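-- pv_equiv track=rewrite | github.com/LucasFerreiraUBA/TP_Grupal_V1 | An_Reu_Cod.py | contador_de_llamadas
-- ===== SOURCE A (Python) =====
-- def contador_de_llamadas(dixTOT):
--     """
--     [Autor: Lucas M. Diana]
--     [Requisitos: listaOG - una lista que contenga el nombre
--                            de todas las funciones.
--                  dixTOT - un diccionario con la cantidad de referencias
--                           que realiza cada funcion.]
--     [Ayuda: Genera un diccionario cuyas claves son las funciones del programa
--             y el contenido de cada llave es una lista con (O)s y (X)s,
--             siendo las X cuando la funcion clave recive una llamada
--             (cada campo refiere a una funcion).]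
--     """
--     dixRec = {}
--     posicionFuncion = 0
--     for funcion in dixTOT:
--         sublistaDeLlamadas = []
--         for key in dixTOT:
--             if dixTOT[key][posicionFuncion] > 0:
--                 sublistaDeLlamadas.append('X')
--             else:
--                 sublistaDeLlamadas.append('O')
--         posicionFuncion += 1
--         dixRec[funcion] = sublistaDeLlamadas
--     return dixRec
-- ===== SOURCE B (Python) =====
-- def contador_de_llamadas(dixTOT):
--     # Pass 1: precompute each function's marks row once ('X' where count > 0).
--     marks = {}
--     for key in dixTOT:
--         marks[key] = ['X' if v > 0 else 'O' for v in dixTOT[key]]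
--     # Pass 2: row for function number i is the i-th column of the marks table.
--     dixRec = {}
--     for i, funcion in enumerate(dixTOT):
--         dixRec[funcion] = [marks[key][i] for key in dixTOT]
--     return dixRec
-- ===== Notes on version B (the rewrite author's own statement) =====
-- stated objective: alternative
-- what changed: Instead of recomputing X/O from the raw counts inside the nested loop, B first builds a marks table (one X/O row per function) and then emits each output row by reading the i-th column of that table via explicit indexing.
import Mathlib
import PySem

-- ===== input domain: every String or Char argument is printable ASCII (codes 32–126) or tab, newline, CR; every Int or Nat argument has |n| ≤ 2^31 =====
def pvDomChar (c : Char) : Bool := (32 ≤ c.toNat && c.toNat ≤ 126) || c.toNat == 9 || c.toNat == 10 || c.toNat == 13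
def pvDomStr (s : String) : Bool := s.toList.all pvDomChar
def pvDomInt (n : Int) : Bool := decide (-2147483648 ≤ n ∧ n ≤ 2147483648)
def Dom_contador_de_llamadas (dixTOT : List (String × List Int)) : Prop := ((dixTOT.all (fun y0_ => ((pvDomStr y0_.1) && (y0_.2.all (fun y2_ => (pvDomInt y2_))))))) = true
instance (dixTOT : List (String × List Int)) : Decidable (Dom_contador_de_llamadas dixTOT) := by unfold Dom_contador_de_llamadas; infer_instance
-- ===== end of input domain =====

-- B replaces A's per-cell recomputation by a precomputed marks table read column-wise (alternative decomposition, same cost).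

-- ===== PORT A =====
-- inner loop: 'for key in dixTOT: … dixTOT[key][posicionFuncion]' — iterating a dict's
-- own keys and looking each up yields the paired value (kv2.2), exact since a Python
-- dict has unique keys (Pre_ pins the assoc-list representation to Nodup keys).
def pvRowA (dixTOT : List (String × List Int)) (pos : Int) : List String :=
  dixTOT.map (fun kv2 => if (PySem.List.pyGet? kv2.2 pos).getD 0 > 0 then "X" else "O")

def contador_de_llamadas (dixTOT : List (String × List Int)) : List (String × List String) :=
  ((dixTOT.foldl
      (fun (st : PySem.Dict String (List String) × Int) kv =>
        (st.1.insert kv.1 (pvRowA dixTOT st.2), st.2 + 1))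
      (PySem.Dict.empty, 0)).1).items

-- ===== PORT B =====
def pvMarkRow (v : List Int) : List String := v.map (fun c => if c > 0 then "X" else "O")

-- pass 1: the marks table ('marks' in Source B)
def pvMarks (dixTOT : List (String × List Int)) : PySem.Dict String (List String) :=
  dixTOT.foldl (fun d kv => d.insert kv.1 (pvMarkRow kv.2)) PySem.Dict.empty

def contador_de_llamadas_alt (dixTOT : List (String × List Int)) : List (String × List String) :=
  ((PySem.List.enumerate dixTOT).foldl
      (fun (dixRec : PySem.Dict String (List String)) p =>
        dixRec.insert p.2.1
          (dixTOT.map (fun kv2 => (PySem.List.pyGet? ((pvMarks dixTOT).getD kv2.1 []) p.1).getD "")))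
      PySem.Dict.empty).items

-- ===== PRECONDITION & SPEC =====
-- Pre_: keys are distinct (the assoc list represents a Python dict) and every count
-- list has at least as many entries as there are functions — otherwise A (and B)
-- raise IndexError at dixTOT[key][posicionFuncion].
def Pre_contador_de_llamadas (dixTOT : List (String × List Int)) : Prop :=
  (dixTOT.map Prod.fst).Nodup ∧ ∀ kv ∈ dixTOT, dixTOT.length ≤ kv.2.length

instance (dixTOT : List (String × List Int)) : Decidable (Pre_contador_de_llamadas dixTOT) := by
  unfold Pre_contador_de_llamadas; infer_instance

def pvWitness_contador_de_llamadas : (List (String × List Int)) :=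
  [("f", [1, 0]), ("g", [0, 3])]

def Spec_contador_de_llamadas (dixTOT : List (String × List Int)) (out : List (String × List String)) : Prop := out = contador_de_llamadas_alt dixTOT
instance (dixTOT : List (String × List Int)) (out : List (String × List String)) : Decidable (Spec_contador_de_llamadas dixTOT out) := by unfold Spec_contador_de_llamadas; infer_instance

-- ===== CLAIM (what is proved, stated in full; the proofs are below) =====
def Claim_equal_contador_de_llamadas : Prop := ∀ (dixTOT : List (String × List Int)), Dom_contador_de_llamadas dixTOT → Pre_contador_de_llamadas dixTOT → Spec_contador_de_llamadas dixTOT (contador_de_llamadas dixTOT)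

-- ===== LEMMAS AND PROOFS =====

-- A's outer loop: inserting fresh keys with a position counter appends one row per key.
theorem pvLoopA (dixTOT : List (String × List Int)) (l : List (String × List Int))
    (d : PySem.Dict String (List String)) (p : Int)
    (hn : (l.map Prod.fst).Nodup) (hf : ∀ kv ∈ l, d.contains kv.1 = false) :
    ((l.foldl
        (fun (st : PySem.Dict String (List String) × Int) kv =>
          (st.1.insert kv.1 (pvRowA dixTOT st.2), st.2 + 1))
        (d, p)).1).items
      = d.items ++ (PySem.List.enumerate l p).map (fun q => (q.2.1, pvRowA dixTOT q.1)) := by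
  induction l generalizing d p with
  | nil => simp [PySem.List.enumerate_nil]
  | cons kv t ih =>
    have hhead : d.contains kv.1 = false := hf kv (by simp)
    have hn' : (t.map Prod.fst).Nodup := (List.nodup_cons.mp hn).2
    have hne : ∀ kv2 ∈ t, kv2.1 ≠ kv.1 := by
      intro kv2 h2 heq
      exact (List.nodup_cons.mp hn).1 (heq ▸ List.mem_map_of_mem h2)
    have hf' : ∀ kv2 ∈ t, (d.insert kv.1 (pvRowA dixTOT p)).contains kv2.1 = false := by
      intro kv2 h2
      rw [PySem.Dict.contains_insert]
      simp [hne kv2 h2, hf kv2 (List.mem_cons_of_mem _ h2)]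
    simp only [List.foldl_cons]
    rw [ih (d.insert kv.1 (pvRowA dixTOT p)) (p + 1) hn' hf',
        PySem.Dict.items_insert_of_not_contains _ _ hhead,
        PySem.List.enumerate_cons]
    simp

theorem pvMarksItems (dixTOT : List (String × List Int))
    (hn : (dixTOT.map Prod.fst).Nodup) :
    (pvMarks dixTOT).items = dixTOT.map (fun kv => (kv.1, pvMarkRow kv.2)) := by
  unfold pvMarks
  rw [PySem.Dict.items_foldl_insert_fresh]
  · rfl
  · intro a _; exact PySem.Dict.contains_empty _
  · exact hn

theorem pvMarksLookup (dixTOT : List (String × List Int))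
    (hn : (dixTOT.map Prod.fst).Nodup) (kv2 : String × List Int) (h : kv2 ∈ dixTOT) :
    (pvMarks dixTOT).getD kv2.1 [] = pvMarkRow kv2.2 := by
  apply PySem.Dict.getD_of_mem_items
  · rw [pvMarksItems dixTOT hn]
    exact List.mem_map_of_mem h
  · show (_ : PySem.Dict _ _).items.map Prod.fst |>.Nodup
    rw [pvMarksItems dixTOT hn, List.map_map]
    exact hn

theorem contador_de_llamadas_spec : Claim_equal_contador_de_llamadas := by
  intro dixTOT _ hpre
  obtain ⟨hn, hlen⟩ := hpre
  unfold Spec_contador_de_llamadas contador_de_llamadas contador_de_llamadas_alt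
  rw [pvLoopA dixTOT dixTOT PySem.Dict.empty 0 hn
        (fun kv _ => PySem.Dict.contains_empty _)]
  have h2 : (PySem.List.enumerate dixTOT 0).map (fun q => q.2.1) = dixTOT.map Prod.fst := by
    conv_rhs => rw [← PySem.List.map_snd_enumerate dixTOT 0]
    rw [List.map_map]
    rfl
  have hB := PySem.Dict.items_foldl_insert_fresh (PySem.List.enumerate dixTOT)
        (fun q => q.2.1)
        (fun q => dixTOT.map (fun kv2 =>
          (PySem.List.pyGet? ((pvMarks dixTOT).getD kv2.1 []) q.1).getD ""))
        PySem.Dict.empty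
        (fun q _ => PySem.Dict.contains_empty _)
        (by rw [h2]; exact hn)
  simp only [] at hB
  rw [hB]
  congr 1
  apply List.map_congr_left
  intro q hq
  obtain ⟨k, hk, rfl⟩ := (PySem.List.mem_enumerate_iff _ _ _).mp hq
  simp only [zero_add]
  refine congrArg _ ?_
  unfold pvRowA
  apply List.map_congr_left
  intro kv2 h2
  rw [pvMarksLookup dixTOT hn kv2 h2]
  have hk2 : k < kv2.2.length := lt_of_lt_of_le hk (hlen kv2 h2)
  rw [PySem.List.pyGet?_natCast, PySem.List.pyGet?_natCast]
  unfold pvMarkRow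
  simp [List.getElem?_map, List.getElem?_eq_getElem hk2]
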